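-- pv_equiv track=rewrite | github.com/JosengeL-010/Password-Strength-Tester | Automation/oampass-evaluator/oampass/features.py | has_repeated_chars
-- ===== SOURCE A (Python) =====
-- def unique_chars(pw: str) -> int:
--     return len(set(pw)) if pw else 0
--
-- def has_repeated_chars(pw: str) -> int:
--     """Flags repeated characters.
--
--     Heuristic: returns 1 if any character repeats consecutively (e.g., "aa") OR
--     if the password has low diversity (unique/len <= 0.5).
--     """
--     if not pw:
--         return 0
--     if any(pw[i] == pw[i - 1] for i in range(1, len(pw))):
--         return 1
--     if len(pw) >= 6 and (unique_chars(pw) / len(pw)) <= 0.5: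
--         return 1
--     return 0
-- ===== SOURCE B (Python) =====
-- def has_repeated_chars(pw: str) -> int:
--     if not pw:
--         return 0
--     alphabet = sorted(set(pw))
--     for c in alphabet:
--         if c + c in pw:
--             return 1
--     if len(pw) >= 6 and 2 * len(alphabet) <= len(pw):
--         return 1
--     return 0
-- ===== Notes on version B (the rewrite author's own statement) =====
-- stated objective: alternative
-- what changed: Consecutive repeats are detected by substring search -- for each character c of the sorted distinct alphabet, test whether the doubled string c+c occurs anywhere in pw -- instead of A's positional any() scan over adjacent indices; the diversity test reuses the alphabet's length (2*len(alphabet) <= len(pw)) instead of calling the unique_chars helper with a float division.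
import Mathlib
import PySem

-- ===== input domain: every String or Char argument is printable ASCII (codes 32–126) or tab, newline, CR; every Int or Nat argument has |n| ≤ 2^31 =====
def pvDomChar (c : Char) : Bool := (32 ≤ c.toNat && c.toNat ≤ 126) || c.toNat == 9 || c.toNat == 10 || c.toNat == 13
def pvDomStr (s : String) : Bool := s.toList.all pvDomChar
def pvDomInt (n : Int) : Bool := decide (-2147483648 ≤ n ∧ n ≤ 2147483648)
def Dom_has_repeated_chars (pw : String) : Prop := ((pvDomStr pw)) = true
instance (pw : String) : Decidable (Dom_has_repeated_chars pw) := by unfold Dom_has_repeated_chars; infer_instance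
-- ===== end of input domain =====

-- B detects consecutive repeats by substring search over the sorted distinct alphabet
-- (is c+c a substring of pw?) instead of A's positional adjacent-index scan, and reuses
-- the alphabet's length for the diversity test (objective: alternative algorithm).

-- ===== PORT A =====
-- unique_chars(pw): len(set(pw)) if pw else 0
def unique_chars (pw : String) : Int :=
  if pw.toList.isEmpty then 0 else ((PySem.Set.ofList pw.toList).length : Int)

def has_repeated_chars (pw : String) : Int :=
  let cs := pw.toList
  if cs.isEmpty then 0
  else if (PySem.List.pyRange 1 (cs.length : Int) 1).any
      (fun i => PySem.List.pyGetD cs i ' ' == PySem.List.pyGetD cs (i - 1) ' ') then 1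
  -- `unique_chars(pw) / len(pw) <= 0.5` ported as `2 * unique_chars pw ≤ len` — exact for these
  -- integer counts (the float quotient is ≤ 0.5 iff twice the numerator is ≤ the denominator).
  else if 6 ≤ cs.length ∧ 2 * unique_chars pw ≤ (cs.length : Int) then 1
  else 0

-- ===== PORT B =====
def has_repeated_chars_alt (pw : String) : Int :=
  let cs := pw.toList
  if cs.isEmpty then 0
  else
    let alphabet := PySem.List.sorted (PySem.Set.ofList cs) (fun c => c) false
    -- the early-returning for-loop `for c in alphabet: if c+c in pw: return 1`
    if alphabet.any (fun c => PySem.Chars.isIn [c, c] cs) then 1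
    else if 6 ≤ cs.length ∧ 2 * (alphabet.length : Int) ≤ (cs.length : Int) then 1
    else 0

-- ===== PRECONDITION & SPEC =====
def Spec_has_repeated_chars (pw : String) (out : Int) : Prop := out = has_repeated_chars_alt pw
instance (pw : String) (out : Int) : Decidable (Spec_has_repeated_chars pw out) := by unfold Spec_has_repeated_chars; infer_instance

-- ===== CLAIM (what is proved, stated in full; the proofs are below) =====
def Claim_equal_has_repeated_chars : Prop := ∀ (pw : String), Dom_has_repeated_chars pw → Spec_has_repeated_chars pw (has_repeated_chars pw)

-- ===== LEMMAS AND PROOFS =====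

-- structural "some adjacent pair is equal", the bridge between the two detections
def hasAdj : List Char → Bool
  | [] => false
  | [_] => false
  | a :: b :: t => (a == b) || hasAdj (b :: t)

lemma hasAdj_iff (cs : List Char) :
    hasAdj cs = true ↔ ∃ k c, cs[k]? = some c ∧ cs[k + 1]? = some c := by
  induction cs with
  | nil => simp [hasAdj]
  | cons a t ih =>
    cases t with
    | nil =>
      simp only [hasAdj, Bool.false_eq_true, false_iff]
      rintro ⟨k, c, h1, h2⟩
      cases k <;> simp_all
    | cons b t' =>
      simp only [hasAdj, Bool.or_eq_true, beq_iff_eq, ih]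
      constructor
      · rintro (rfl | ⟨k, c, h1, h2⟩)
        · exact ⟨0, a, by simp, by simp⟩
        · exact ⟨k + 1, c, by simpa using h1, by simpa using h2⟩
      · rintro ⟨k, c, h1, h2⟩
        cases k with
        | zero =>
          left
          simp only [List.getElem?_cons_zero, Option.some_inj] at h1
          simp only [List.getElem?_cons_succ, List.getElem?_cons_zero, Option.some_inj] at h2
          rw [h1, h2]
        | succ k' => right; exact ⟨k', c, by simpa using h1, by simpa using h2⟩

-- A's any-over-range equals the structural adjacent-repeat test
lemma anyA_eq_hasAdj (cs : List Char) :
    ((PySem.List.pyRange 1 (cs.length : Int) 1).any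
      (fun i => PySem.List.pyGetD cs i ' ' == PySem.List.pyGetD cs (i - 1) ' ')) = hasAdj cs := by
  rw [Bool.eq_iff_iff, List.any_eq_true, hasAdj_iff]
  constructor
  · rintro ⟨i, hmem, hp⟩
    rw [PySem.List.mem_pyRange_one] at hmem
    obtain ⟨h1, h2⟩ := hmem
    have hi2 : i.toNat < cs.length := by omega
    have hi1 : i.toNat - 1 < cs.length := by omega
    rw [PySem.List.pyGetD_eq_getElem cs ' ' (by omega) h2,
        PySem.List.pyGetD_eq_getElem cs ' ' (by omega) (by omega)] at hp
    rw [beq_iff_eq] at hp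
    have hp' : cs[(i - 1).toNat]? = some cs[i.toNat] := by
      rw [List.getElem?_eq_getElem (by omega)]
      exact congrArg some hp.symm
    refine ⟨i.toNat - 1, cs[i.toNat], ?_, ?_⟩
    · rw [show i.toNat - 1 = (i - 1).toNat from by omega]
      exact hp'
    · rw [show i.toNat - 1 + 1 = i.toNat from by omega, List.getElem?_eq_getElem hi2]
  · rintro ⟨k, c, h1, h2⟩
    have hk1 : k + 1 < cs.length := by
      by_contra h
      rw [List.getElem?_eq_none (by omega)] at h2
      simp at h2
    rw [List.getElem?_eq_getElem hk1] at h2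
    rw [List.getElem?_eq_getElem (by omega)] at h1
    have hck : cs[k]'(by omega) = c := Option.some.inj h1
    have hck1 : cs[k + 1]'hk1 = c := Option.some.inj h2
    refine ⟨(k : Int) + 1, ?_, ?_⟩
    · rw [PySem.List.mem_pyRange_one]; constructor <;> [omega; exact_mod_cast hk1]
    · rw [PySem.List.pyGetD_eq_getElem cs ' ' (by omega) (by exact_mod_cast hk1),
          PySem.List.pyGetD_eq_getElem cs ' ' (by omega) (by omega)]
      rw [beq_iff_eq]
      apply Option.some.inj
      rw [← List.getElem?_eq_getElem, ← List.getElem?_eq_getElem]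
      have e1 : ((k : Int) + 1).toNat = k + 1 := by omega
      have e2 : ((k : Int) + 1 - 1).toNat = k := by omega
      rw [e1, e2, List.getElem?_eq_getElem hk1, List.getElem?_eq_getElem (by omega), hck, hck1]

-- an adjacent repeat is exactly a doubled-character substring
lemma hasAdj_iff_double_infix (cs : List Char) :
    hasAdj cs = true ↔ ∃ c, [c, c] <:+: cs := by
  induction cs with
  | nil => simp [hasAdj]
  | cons a t ih =>
    cases t with
    | nil =>
      simp only [hasAdj, Bool.false_eq_true, false_iff]
      rintro ⟨c, h⟩
      have := h.sublist.length_le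
      simp at this
    | cons b t' =>
      simp only [hasAdj, Bool.or_eq_true, beq_iff_eq, ih]
      constructor
      · rintro (rfl | ⟨c, h⟩)
        · exact ⟨a, ⟨[], t', by simp⟩⟩
        · exact ⟨c, h.trans (List.infix_cons_iff.mpr (Or.inr (List.infix_refl _)))⟩
      · rintro ⟨c, h⟩
        rcases List.infix_cons_iff.mp h with hpre | hinf
        · rcases hpre with ⟨s, hs⟩
          simp only [List.cons_append, List.nil_append, List.cons.injEq] at hs
          obtain ⟨rfl, rfl, -⟩ := hs
          exact Or.inl rfl
        · exact Or.inr ⟨c, hinf⟩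

-- B's alphabet loop equals the structural adjacent-repeat test
lemma anyB_eq_hasAdj (cs : List Char) :
    ((PySem.List.sorted (PySem.Set.ofList cs) (fun c => c) false).any
      (fun c => PySem.Chars.isIn [c, c] cs)) = hasAdj cs := by
  rw [Bool.eq_iff_iff, List.any_eq_true, hasAdj_iff_double_infix]
  constructor
  · rintro ⟨c, _, hin⟩
    exact ⟨c, (PySem.Chars.isIn_iff_infix _ _).mp hin⟩
  · rintro ⟨c, hinf⟩
    refine ⟨c, ?_, (PySem.Chars.isIn_iff_infix _ _).mpr hinf⟩
    rw [PySem.List.mem_sorted, PySem.Set.mem_ofList]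
    exact hinf.sublist.subset (by simp)

-- ===== VERDICT (by name: the statement is the Claim_ definition above) =====
theorem has_repeated_chars_spec : Claim_equal_has_repeated_chars := by
  intro pw _
  unfold Spec_has_repeated_chars has_repeated_chars has_repeated_chars_alt unique_chars
  cases hcs : pw.toList with
  | nil => simp
  | cons c rest =>
    simp only [List.isEmpty_cons, Bool.false_eq_true, if_false]
    rw [anyA_eq_hasAdj, anyB_eq_hasAdj]
    cases hasAdj (c :: rest) with
    | true => simp
    | false =>
      simp only [Bool.false_eq_true, if_false]
      rw [PySem.List.length_sorted]
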